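-- pv_equiv track=rewrite | github.com/senivan/Project-Cortana | week3/blackbox/keyword_ai.py | find_films_with_keywords
-- ===== SOURCE A (Python) =====
-- def find_film_keywords(film_keywords: dict, film_name: str):
--     """
--     Find and return the list of keywords for the film
--     """
--     result = set()
--     if isinstance(film_keywords, tuple):
--         film_keywords = film_keywords[1]
--     for key in film_keywords:
--         if film_name in film_keywords[key]:
--             result.add(key)
--     return result
--
-- def find_films_with_keywords(film_keywords: dict, num_of_films: int):
--     """
--     Find and return the list of films and ammonut of keywords for the film
--     """
--     if num_of_films == 0:
--         return []
--     films = list({lst1 for lst in film_keywords.values() for lst1 in lst})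
--     films = sorted(films, key=lambda x: len(find_film_keywords(film_keywords, x)), reverse=True)
--     result = []
--     mid_res = {}
--     for film in films:
--         if len(find_film_keywords(film_keywords, film)) not in mid_res:
--             mid_res[len(find_film_keywords(film_keywords, film))] = [film]
--         else:
--             mid_res[len(find_film_keywords(film_keywords, film))].append(film)
--     for key in mid_res:
--         mid_res[key] = sorted(mid_res[key], reverse=True)
--     result = [(film, len(find_film_keywords(film_keywords, film))) \
-- for key in mid_res for film in mid_res[key]]
--     return result[:num_of_films]
-- ===== SOURCE B (Python) =====
-- def find_films_with_keywords(film_keywords: dict, num_of_films: int):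
--     """
--     Find and return the list of films and amount of keywords for the film
--     """
--     if num_of_films == 0:
--         return []
--     counts = {}
--     for lst in film_keywords.values():
--         for film in set(lst):
--             counts[film] = counts.get(film, 0) + 1
--     ranked = sorted(counts, key=lambda f: (counts[f], f), reverse=True)
--     return [(film, counts[film]) for film in ranked][:num_of_films]
-- ===== Notes on version B (the rewrite author's own statement) =====
-- stated objective: faster
-- what changed: Replaces A's per-film rescans of the whole dict (a full dict scan per film for every sort comparison and bucketing step) plus sort-then-bucket-then-resort by a single counting pass over the dict values followed by one sort with the tuple key (count, name) descending.
import Mathlib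
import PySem

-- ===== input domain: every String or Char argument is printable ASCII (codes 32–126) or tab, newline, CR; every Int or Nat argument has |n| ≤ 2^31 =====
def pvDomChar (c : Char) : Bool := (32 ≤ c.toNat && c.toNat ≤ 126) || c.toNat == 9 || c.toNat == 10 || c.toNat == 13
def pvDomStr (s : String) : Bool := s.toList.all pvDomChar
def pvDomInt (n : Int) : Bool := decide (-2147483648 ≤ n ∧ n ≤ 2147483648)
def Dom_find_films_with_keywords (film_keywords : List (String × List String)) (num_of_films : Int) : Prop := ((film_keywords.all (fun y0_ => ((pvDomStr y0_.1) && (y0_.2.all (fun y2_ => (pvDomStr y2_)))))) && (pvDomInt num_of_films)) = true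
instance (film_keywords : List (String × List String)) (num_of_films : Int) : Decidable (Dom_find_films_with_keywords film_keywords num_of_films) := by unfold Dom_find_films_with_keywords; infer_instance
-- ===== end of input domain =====

-- B replaces A's repeated whole-dict rescans + sort/bucket/re-sort by one counting pass over the
-- dict values followed by a single sort on the tuple key (count, name) descending (objective: faster).

-- ===== PORT A =====
-- Python set iteration order is not observable in A's final result (it is proved equal to B's
-- deterministic result); the set literals are modeled with insertion-ordered PySem.Set.
def find_film_keywords (film_keywords : List (String × List String)) (film_name : String) : PySem.Set String :=
  -- 'film_keywords[key]' never raises (key comes from the dict itself); getD is exact here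
  (PySem.Dict.mk film_keywords).keys.foldl
    (fun result key =>
      if ((PySem.Dict.mk film_keywords).getD key []).contains film_name then
        PySem.Set.add result key
      else result)
    PySem.Set.empty

-- A's repeated expression len(find_film_keywords(film_keywords, x)) (recomputed at every use, as in A)
def aCount (film_keywords : List (String × List String)) (film : String) : Int :=
  PySem.Set.len (find_film_keywords film_keywords film)

-- films = list({lst1 for lst in film_keywords.values() for lst1 in lst})
def aFilms (film_keywords : List (String × List String)) : PySem.Set String :=
  PySem.Set.ofList ((PySem.Dict.mk film_keywords).values.flatMap (fun lst => lst))

-- films = sorted(films, key=..., reverse=True)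
def aSortedFilms (film_keywords : List (String × List String)) : List String :=
  PySem.List.sorted (aFilms film_keywords) (fun x => aCount film_keywords x) true

-- the body of the mid_res-building loop
def aStep (film_keywords : List (String × List String)) (m : PySem.Dict Int (List String))
    (film : String) : PySem.Dict Int (List String) :=
  if !(m.contains (aCount film_keywords film)) then
    m.insert (aCount film_keywords film) [film]
  else
    m.modify (aCount film_keywords film) [] (fun l => l ++ [film])

def aMid (film_keywords : List (String × List String)) : PySem.Dict Int (List String) :=
  (aSortedFilms film_keywords).foldl (aStep film_keywords)
    (PySem.Dict.mk ([] : List (Int × List String)))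

-- for key in mid_res: mid_res[key] = sorted(mid_res[key], reverse=True)
def aMid2 (film_keywords : List (String × List String)) : PySem.Dict Int (List String) :=
  (aMid film_keywords).keys.foldl
    (fun m key => m.insert key (PySem.List.sorted (m.getD key []) (fun x => x) true))
    (aMid film_keywords)

-- result = [(film, len(find_film_keywords(film_keywords, film))) for key in mid_res for film in mid_res[key]]
def aResult (film_keywords : List (String × List String)) : List (String × Int) :=
  (aMid2 film_keywords).keys.flatMap
    (fun key => ((aMid2 film_keywords).getD key []).map
      (fun film => (film, aCount film_keywords film)))

def find_films_with_keywords (film_keywords : List (String × List String)) (num_of_films : Int) : List (String × Int) :=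
  if num_of_films == 0 then []
  else PySem.List.slice (aResult film_keywords) none (some num_of_films)

-- ===== PORT B =====
-- counts[film] = counts.get(film, 0) + 1 over set(lst) for each value list lst
def bCounts (film_keywords : List (String × List String)) : PySem.Dict String Int :=
  (PySem.Dict.mk film_keywords).values.foldl
    (fun c lst => (PySem.Set.ofList lst).foldl
      (fun c film => c.insert film (c.getD film 0 + 1)) c)
    (PySem.Dict.mk ([] : List (String × Int)))

-- ranked = sorted(counts, key=lambda f: (counts[f], f), reverse=True); tuple key = lexicographic order
def bRanked (film_keywords : List (String × List String)) : List String :=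
  PySem.List.sorted (bCounts film_keywords).keys
    (fun f => toLex (((bCounts film_keywords).getD f 0, f) : Int × String)) true

def find_films_with_keywords_alt (film_keywords : List (String × List String)) (num_of_films : Int) : List (String × Int) :=
  if num_of_films == 0 then []
  else PySem.List.slice
    ((bRanked film_keywords).map (fun film => (film, (bCounts film_keywords).getD film 0)))
    none (some num_of_films)

-- ===== PRECONDITION & SPEC =====
-- Pre_ excludes only association lists with a duplicated key: those represent no Python dict at
-- all (a Python dict cannot hold the same key twice), so A is never run on them.
def Pre_find_films_with_keywords (film_keywords : List (String × List String)) (num_of_films : Int) : Prop :=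
  (film_keywords.map Prod.fst).Nodup
instance (film_keywords : List (String × List String)) (num_of_films : Int) : Decidable (Pre_find_films_with_keywords film_keywords num_of_films) := by unfold Pre_find_films_with_keywords; infer_instance

def pvWitness_find_films_with_keywords : (List (String × List String)) × Int :=
  ([("k1", ["f1", "f2"]), ("k2", ["f2"])], 3)

def Spec_find_films_with_keywords (film_keywords : List (String × List String)) (num_of_films : Int) (out : List (String × Int)) : Prop := out = find_films_with_keywords_alt film_keywords num_of_films
instance (film_keywords : List (String × List String)) (num_of_films : Int) (out : List (String × Int)) : Decidable (Spec_find_films_with_keywords film_keywords num_of_films out) := by unfold Spec_find_films_with_keywords; infer_instance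

-- ===== CLAIM (what is proved, stated in full; the proofs are below) =====
def Claim_equal_find_films_with_keywords : Prop := ∀ (film_keywords : List (String × List String)) (num_of_films : Int), Dom_find_films_with_keywords film_keywords num_of_films → Pre_find_films_with_keywords film_keywords num_of_films → Spec_find_films_with_keywords film_keywords num_of_films (find_films_with_keywords film_keywords num_of_films)

-- ===== LEMMAS AND PROOFS =====

-- ---- generic small lemmas ----

theorem pv_dict_contains_eq_keys (κ ν : Type) [BEq κ] [LawfulBEq κ] (d : PySem.Dict κ ν) (k : κ) :
    d.contains k = d.keys.contains k := by
  rw [Bool.eq_iff_iff]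
  simp only [PySem.Dict.contains, PySem.Dict.keys, List.any_eq_true, List.contains_iff_mem,
    List.mem_map, beq_iff_eq]

theorem pv_contains_iff_get?_isSome (κ ν : Type) [BEq κ] (d : PySem.Dict κ ν) (k : κ) :
    d.contains k = true ↔ (d.get? k).isSome := by
  simp [PySem.Dict.contains, PySem.Dict.get?, List.any_eq_true, List.find?_isSome]

theorem pv_keys_insert_of_contains (κ ν : Type) [BEq κ] [LawfulBEq κ] (d : PySem.Dict κ ν) (k : κ) (v : ν)
    (h : d.contains k = true) : (d.insert k v).keys = d.keys := by
  simp only [PySem.Dict.insert, h, if_true, PySem.Dict.keys, List.map_map]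
  apply List.map_congr_left
  intro p _
  by_cases hb : (p.1 == k)
  · have : p.1 = k := eq_of_beq hb
    simp [Function.comp, this]
  · simp [hb, Function.comp]

theorem pv_mem_foldl_add (α : Type) [BEq α] [LawfulBEq α] (l s : List α) (x : α) :
    x ∈ l.foldl PySem.Set.add s ↔ x ∈ s ∨ x ∈ l := by
  induction l generalizing s with
  | nil => simp
  | cons a l ih =>
    simp only [List.foldl_cons, ih, PySem.Set.mem_add, List.mem_cons]
    tauto

theorem pv_nodup_foldl_add (α : Type) [BEq α] [LawfulBEq α] (l s : List α) (h : s.Nodup) :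
    (l.foldl PySem.Set.add s).Nodup := by
  induction l generalizing s with
  | nil => simpa
  | cons a l ih =>
    simp only [List.foldl_cons]
    exact ih _ (PySem.Set.nodup_add s a h)

theorem pv_foldl_add_sublist (α : Type) [BEq α] (l : List α) :
    ∀ s : List α, ∃ t, l.foldl PySem.Set.add s = s ++ t ∧ t.Sublist l := by
  induction l with
  | nil => intro s; exact ⟨[], by simp, by simp⟩
  | cons a l ih =>
    intro s
    by_cases h : s.contains a = true
    · obtain ⟨t, h1, h2⟩ := ih s
      refine ⟨t, ?_, h2.cons a⟩
      simp only [List.foldl_cons]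
      have ha : PySem.Set.add s a = s := by simp [PySem.Set.add, h]
      rw [ha, h1]
    · obtain ⟨t, h1, h2⟩ := ih (s ++ [a])
      refine ⟨a :: t, ?_, h2.cons₂ a⟩
      simp only [List.foldl_cons]
      have ha : PySem.Set.add s a = s ++ [a] := by simp [PySem.Set.add, h]
      rw [ha, h1]
      simp

theorem pv_ofList_sublist (α : Type) [BEq α] (l : List α) : (PySem.Set.ofList l).Sublist l := by
  obtain ⟨t, h1, h2⟩ := pv_foldl_add_sublist α l []
  have : PySem.Set.ofList l = t := by
    simp only [PySem.Set.ofList, PySem.Set.empty, h1, List.nil_append]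
  rw [this]
  exact h2

-- ---- A's helper = a filter of the key list ----

theorem pv_fold_filter (p : String → Bool) :
    ∀ (l s : List String), l.Nodup → (∀ x ∈ l, x ∉ s) →
      l.foldl (fun r k => if p k then PySem.Set.add r k else r) s = s ++ l.filter p := by
  intro l
  induction l with
  | nil => intro s _ _; simp
  | cons x l ih =>
    intro s hnd hdis
    simp only [List.foldl_cons, List.filter_cons]
    by_cases hp : p x
    · have hxmem : x ∉ s := hdis x (by simp)
      have hadd : PySem.Set.add s x = s ++ [x] := by
        simp [PySem.Set.add, hxmem]
      have hdis' : ∀ y ∈ l, y ∉ s ++ [x] := by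
        intro y hy
        simp only [List.mem_append, List.mem_singleton]
        rintro (h | rfl)
        · exact hdis y (by simp [hy]) h
        · exact (List.nodup_cons.mp hnd).1 hy
      rw [if_pos hp, hadd, ih (s ++ [x]) (List.nodup_cons.mp hnd).2 hdis']
      simp [hp]
    · rw [if_neg hp, ih s (List.nodup_cons.mp hnd).2 (fun y hy => hdis y (by simp [hy]))]
      simp [hp]

theorem pv_get?_mk_nodup :
    ∀ (fk : List (String × List String)) (k : String) (v : List String),
      (fk.map Prod.fst).Nodup → (k, v) ∈ fk → (PySem.Dict.mk fk).get? k = some v := by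
  intro fk
  induction fk with
  | nil => intro k v _ h; simp at h
  | cons kv t ih =>
    intro k v hnd hmem
    obtain ⟨k', v'⟩ := kv
    rw [show PySem.Dict.mk ((k', v') :: t) = PySem.Dict.mk ((k', v') :: t) from rfl,
      PySem.Dict.get?_mk_cons]
    by_cases hb : (k' == k) = true
    · have hk : k' = k := eq_of_beq hb
      rw [if_pos hb]
      rcases List.mem_cons.mp hmem with h | h
      · injection h with h1 h2
        rw [h2]
      · exfalso
        have hmm : k ∈ t.map Prod.fst := List.mem_map.mpr ⟨(k, v), h, rfl⟩
        rw [← hk] at hmm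
        simp only [List.map_cons] at hnd
        exact (List.nodup_cons.mp hnd).1 hmm
    · rw [if_neg hb]
      rcases List.mem_cons.mp hmem with h | h
      · exfalso; injection h with h1 h2; subst h1; simp at hb
      · exact ih k v (by simp only [List.map_cons] at hnd; exact (List.nodup_cons.mp hnd).2) h

theorem pv_ffk_filter (fk : List (String × List String)) (f : String)
    (hnd : (fk.map Prod.fst).Nodup) :
    find_film_keywords fk f =
      (fk.map Prod.fst).filter (fun k => ((PySem.Dict.mk fk).getD k []).contains f) := by
  unfold find_film_keywords
  have hkeys : (PySem.Dict.mk fk).keys = fk.map Prod.fst := rfl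
  rw [hkeys]
  have := pv_fold_filter (fun k => ((PySem.Dict.mk fk).getD k []).contains f)
    (fk.map Prod.fst) [] hnd (by simp)
  simpa [PySem.Set.empty] using this

theorem pv_aCount_eq (fk : List (String × List String)) (f : String)
    (hnd : (fk.map Prod.fst).Nodup) :
    aCount fk f = (fk.countP (fun kv => kv.2.contains f) : Int) := by
  unfold aCount
  rw [pv_ffk_filter fk f hnd]
  simp only [PySem.Set.len]
  congr 1
  rw [← List.countP_eq_length_filter, List.countP_map]
  apply List.countP_congr
  intro kv hkv
  have hg : (PySem.Dict.mk fk).get? kv.1 = some kv.2 :=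
    pv_get?_mk_nodup fk kv.1 kv.2 hnd (by simpa using hkv)
  simp [Function.comp, PySem.Dict.getD, hg]

-- ---- B's counter ----

theorem pv_getD_incr_fold :
    ∀ (m : List String) (c : PySem.Dict String Int) (f : String), m.Nodup →
      (m.foldl (fun c x => c.insert x (c.getD x 0 + 1)) c).getD f 0 =
        c.getD f 0 + (if f ∈ m then 1 else 0) := by
  intro m
  induction m with
  | nil => intro c f _; simp
  | cons x m ih =>
    intro c f hnd
    simp only [List.foldl_cons]
    rw [ih _ f (List.nodup_cons.mp hnd).2]
    rw [PySem.Dict.getD_insert]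
    by_cases hfx : f = x
    · subst hfx
      have hnm : f ∉ m := (List.nodup_cons.mp hnd).1
      simp [hnm]
    · simp only [hfx, if_false, List.mem_cons]
      have : (f ∈ m ∨ f = x) ↔ f ∈ m := by tauto
      by_cases hm : f ∈ m <;> simp [hm]

theorem pv_counts_fold_getD :
    ∀ (vals : List (List String)) (c : PySem.Dict String Int) (f : String),
      (vals.foldl (fun c lst => (PySem.Set.ofList lst).foldl
          (fun c film => c.insert film (c.getD film 0 + 1)) c) c).getD f 0
        = c.getD f 0 + (vals.countP (fun v => v.contains f) : Int) := by
  intro vals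
  induction vals with
  | nil => intro c f; simp
  | cons v vals ih =>
    intro c f
    simp only [List.foldl_cons]
    rw [ih, pv_getD_incr_fold (PySem.Set.ofList v) c f (PySem.Set.nodup_ofList v)]
    have hmem : f ∈ PySem.Set.ofList v ↔ v.contains f = true := by
      rw [PySem.Set.mem_ofList]; simp
    rw [List.countP_cons]
    by_cases hv : v.contains f = true
    · rw [if_pos (hmem.mpr hv)]
      simp only [hv, if_true]
      push_cast
      ring
    · rw [if_neg (fun h => hv (hmem.mp h))]
      simp only [hv, Bool.false_eq_true, if_false]
      push_cast
      ring

theorem pv_bCounts_getD (fk : List (String × List String)) (f : String)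
    (hnd : (fk.map Prod.fst).Nodup) :
    (bCounts fk).getD f 0 = aCount fk f := by
  unfold bCounts
  rw [pv_counts_fold_getD]
  have h0 : (PySem.Dict.mk ([] : List (String × Int))).getD f 0 = 0 := rfl
  have hv : (PySem.Dict.mk fk).values = fk.map Prod.snd := rfl
  rw [h0, hv, List.countP_map, pv_aCount_eq fk f hnd]
  rw [zero_add]
  norm_cast

theorem pv_counts_fold_keys (vals : List (List String)) :
    ∀ (c : PySem.Dict String Int),
      (vals.foldl (fun c lst => (PySem.Set.ofList lst).foldl
          (fun c film => c.insert film (c.getD film 0 + 1)) c) c).keys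
        = vals.foldl (fun s lst => PySem.Set.update s (PySem.Set.ofList lst)) c.keys := by
  induction vals with
  | nil => intro c; rfl
  | cons v vals ih =>
    intro c
    simp only [List.foldl_cons]
    rw [ih]
    congr 1
    exact PySem.Dict.keys_foldl_insert (PySem.Set.ofList v) _ c

theorem pv_update_mem (α : Type) [BEq α] [LawfulBEq α] (s l : List α) (x : α) :
    x ∈ PySem.Set.update s l ↔ x ∈ s ∨ x ∈ l := by
  simp only [PySem.Set.update]
  exact pv_mem_foldl_add α l s x

theorem pv_fold_update_mem :
    ∀ (vals : List (List String)) (s : List String) (f : String),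
      f ∈ vals.foldl (fun s lst => PySem.Set.update s (PySem.Set.ofList lst)) s
        ↔ f ∈ s ∨ ∃ lst ∈ vals, f ∈ lst := by
  intro vals
  induction vals with
  | nil => intro s f; simp
  | cons v vals ih =>
    intro s f
    simp only [List.foldl_cons]
    rw [ih]
    rw [pv_update_mem String s (PySem.Set.ofList v) f, PySem.Set.mem_ofList]
    simp only [List.mem_cons]
    constructor
    · rintro ((h | h) | ⟨lst, hl, hf⟩)
      · exact Or.inl h
      · exact Or.inr ⟨v, Or.inl rfl, h⟩
      · exact Or.inr ⟨lst, Or.inr hl, hf⟩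
    · rintro (h | ⟨lst, (rfl | hl), hf⟩)
      · exact Or.inl (Or.inl h)
      · exact Or.inl (Or.inr hf)
      · exact Or.inr ⟨lst, hl, hf⟩

theorem pv_fold_update_nodup :
    ∀ (vals : List (List String)) (s : List String), s.Nodup →
      (vals.foldl (fun s lst => PySem.Set.update s (PySem.Set.ofList lst)) s).Nodup := by
  intro vals
  induction vals with
  | nil => intro s h; simpa
  | cons v vals ih =>
    intro s h
    simp only [List.foldl_cons]
    exact ih _ (pv_nodup_foldl_add String (PySem.Set.ofList v) s h)

theorem pv_bCounts_keys_mem (fk : List (String × List String)) (f : String) :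
    f ∈ (bCounts fk).keys ↔ ∃ lst ∈ (PySem.Dict.mk fk).values, f ∈ lst := by
  unfold bCounts
  rw [pv_counts_fold_keys]
  have hk0 : (PySem.Dict.mk ([] : List (String × Int))).keys = [] := rfl
  rw [hk0, pv_fold_update_mem]
  simp

theorem pv_bCounts_keys_nodup (fk : List (String × List String)) :
    (bCounts fk).keys.Nodup := by
  unfold bCounts
  rw [pv_counts_fold_keys]
  have hk0 : (PySem.Dict.mk ([] : List (String × Int))).keys = [] := rfl
  rw [hk0]
  exact pv_fold_update_nodup _ [] (by simp)

-- ---- A's buckets ----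

def gcomb (o : Option (List String)) (xs : List String) : Option (List String) :=
  match o with
  | some v => some (v ++ xs)
  | none => if xs.isEmpty then none else some xs

theorem pv_bucket_get? (fk : List (String × List String)) :
    ∀ (l : List String) (m : PySem.Dict Int (List String)) (k : Int),
      (l.foldl (aStep fk) m).get? k = gcomb (m.get? k) (l.filter (fun f => aCount fk f == k)) := by
  intro l
  induction l with
  | nil =>
    intro m k
    simp only [List.foldl_nil, List.filter_nil]
    cases h : m.get? k <;> simp [gcomb]
  | cons film l ih =>
    intro m k
    simp only [List.foldl_cons, List.filter_cons]
    rw [ih]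
    by_cases hbk : (aCount fk film == k) = true
    · have hk : aCount fk film = k := by simpa using hbk
      subst hk
      simp only [BEq.rfl, if_true]
      unfold aStep
      by_cases hc : m.contains (aCount fk film) = true
      · simp only [hc, Bool.not_true, Bool.false_eq_true, if_false, PySem.Dict.modify]
        obtain ⟨v, hv⟩ := Option.isSome_iff_exists.mp
          ((pv_contains_iff_get?_isSome _ _ m _).mp hc)
        rw [PySem.Dict.get?_insert_self]
        simp [gcomb, hv, PySem.Dict.getD]
      · have hc' : m.contains (aCount fk film) = false := by simpa using hc
        have hnone : m.get? (aCount fk film) = none := by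
          rcases h : m.get? (aCount fk film) with _ | v
          · rfl
          · exfalso
            have := (pv_contains_iff_get?_isSome _ _ m (aCount fk film)).mpr (by simp [h])
            simp [this] at hc'
        simp only [hc', Bool.not_false, if_true]
        rw [PySem.Dict.get?_insert_self, hnone]
        simp [gcomb]
    · have hkne : k ≠ aCount fk film := by
        intro h
        simp [h] at hbk
      simp only [hbk, Bool.false_eq_true, if_false]
      unfold aStep
      by_cases hc : m.contains (aCount fk film) = true
      · simp only [hc, Bool.not_true, Bool.false_eq_true, if_false, PySem.Dict.modify]
        rw [PySem.Dict.get?_insert_of_ne _ _ hkne]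
      · have hc' : m.contains (aCount fk film) = false := by simpa using hc
        simp only [hc', Bool.not_false, if_true]
        rw [PySem.Dict.get?_insert_of_ne _ _ hkne]

theorem pv_bucket_keys (fk : List (String × List String)) :
    ∀ (l : List String) (m : PySem.Dict Int (List String)),
      (l.foldl (aStep fk) m).keys = PySem.Set.update m.keys (l.map (aCount fk)) := by
  have hstep : ∀ (m : PySem.Dict Int (List String)) (film : String),
      (aStep fk m film).keys = PySem.Set.add m.keys (aCount fk film) := by
    intro m film
    unfold aStep
    by_cases hc : m.contains (aCount fk film) = true
    · simp only [hc, Bool.not_true, Bool.false_eq_true, if_false, PySem.Dict.modify]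
      rw [pv_keys_insert_of_contains _ _ _ _ _ hc]
      have hkc : m.keys.contains (aCount fk film) = true := by
        rw [← pv_dict_contains_eq_keys]; exact hc
      have hmem : aCount fk film ∈ m.keys := by simpa using hkc
      simp [PySem.Set.add, hmem]
    · have hc' : m.contains (aCount fk film) = false := by simpa using hc
      have hkc : m.keys.contains (aCount fk film) = false := by
        rw [← pv_dict_contains_eq_keys]; exact hc'
      have hmem : aCount fk film ∉ m.keys := by simpa using hkc
      simp only [hc', Bool.not_false, if_true]
      have hkcf : (List.map Prod.fst m.items).contains (aCount fk film) = false := by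
        simpa [PySem.Dict.keys] using hkc
      simp only [PySem.Dict.insert, hc', Bool.false_eq_true, if_false, PySem.Dict.keys,
        List.map_append, List.map_cons, List.map_nil, PySem.Set.add]
      have hsc : PySem.Set.contains (List.map (fun x => x.1) m.items) (aCount fk film) = false := by
        simpa [PySem.Set.contains, PySem.Dict.keys] using hmem
      rw [hsc]
      simp
  intro l
  induction l with
  | nil => intro m; rfl
  | cons film l ih =>
    intro m
    simp only [List.foldl_cons, List.map_cons]
    rw [ih, hstep]
    simp [PySem.Set.update]

theorem pv_aMid_keys (fk : List (String × List String)) :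
    (aMid fk).keys = PySem.Set.ofList ((aSortedFilms fk).map (aCount fk)) := by
  unfold aMid
  rw [pv_bucket_keys]
  have h0 : (PySem.Dict.mk ([] : List (Int × List String))).keys = [] := rfl
  rw [h0]
  simp [PySem.Set.update, PySem.Set.ofList, PySem.Set.empty]

theorem pv_aMid_getD (fk : List (String × List String)) (k : Int) (hk : k ∈ (aMid fk).keys) :
    (aMid fk).getD k [] = (aSortedFilms fk).filter (fun f => aCount fk f == k) := by
  have hmem : k ∈ (aSortedFilms fk).map (aCount fk) := by
    rw [pv_aMid_keys] at hk
    exact (PySem.Set.mem_ofList _ _).mp hk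
  obtain ⟨f, hf, hfk⟩ := List.mem_map.mp hmem
  unfold aMid
  simp only [PySem.Dict.getD]
  rw [pv_bucket_get? fk]
  have h0 : (PySem.Dict.mk ([] : List (Int × List String))).get? k = none := rfl
  rw [h0]
  have hne : ((aSortedFilms fk).filter (fun f => aCount fk f == k)) ≠ [] := by
    intro hnil
    have : f ∈ (aSortedFilms fk).filter (fun f => aCount fk f == k) :=
      List.mem_filter.mpr ⟨hf, by simp [hfk]⟩
    simp [hnil] at this
  simp [gcomb, List.isEmpty_iff, hne]

-- ---- re-sorting the buckets ----

theorem pv_resort_keys :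
    ∀ (ks : List Int) (m : PySem.Dict Int (List String)), (∀ k ∈ ks, m.contains k = true) →
      (ks.foldl (fun m k => m.insert k (PySem.List.sorted (m.getD k []) (fun x => x) true)) m).keys = m.keys := by
  intro ks
  induction ks with
  | nil => intro m _; rfl
  | cons k ks ih =>
    intro m hc
    simp only [List.foldl_cons]
    have hck := hc k (by simp)
    have hkeys : (m.insert k (PySem.List.sorted (m.getD k []) (fun x => x) true)).keys = m.keys :=
      pv_keys_insert_of_contains _ _ _ _ _ hck
    have hc' : ∀ j ∈ ks,
        (m.insert k (PySem.List.sorted (m.getD k []) (fun x => x) true)).contains j = true := by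
      intro j hj
      rw [pv_dict_contains_eq_keys, hkeys, ← pv_dict_contains_eq_keys]
      exact hc j (by simp [hj])
    rw [ih _ hc', hkeys]

theorem pv_resort_getD :
    ∀ (ks : List Int) (m : PySem.Dict Int (List String)), ks.Nodup →
      (∀ k ∈ ks, m.contains k = true) → ∀ q,
      (ks.foldl (fun m k => m.insert k (PySem.List.sorted (m.getD k []) (fun x => x) true)) m).getD q [] =
        if q ∈ ks then PySem.List.sorted (m.getD q []) (fun x => x) true else m.getD q [] := by
  intro ks
  induction ks with
  | nil => intro m _ _ q; simp
  | cons k ks ih =>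
    intro m hnd hc q
    simp only [List.foldl_cons]
    have hck := hc k (by simp)
    have hkeys : (m.insert k (PySem.List.sorted (m.getD k []) (fun x => x) true)).keys = m.keys :=
      pv_keys_insert_of_contains _ _ _ _ _ hck
    have hc' : ∀ j ∈ ks,
        (m.insert k (PySem.List.sorted (m.getD k []) (fun x => x) true)).contains j = true := by
      intro j hj
      rw [pv_dict_contains_eq_keys, hkeys, ← pv_dict_contains_eq_keys]
      exact hc j (by simp [hj])
    rw [ih _ (List.nodup_cons.mp hnd).2 hc' q]
    have hget1 : ∀ q' : Int,
        (m.insert k (PySem.List.sorted (m.getD k []) (fun x => x) true)).getD q' [] =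
          if q' = k then PySem.List.sorted (m.getD k []) (fun x => x) true else m.getD q' [] :=
      fun q' => PySem.Dict.getD_insert m k q' _ []
    by_cases hqk : q = k
    · subst hqk
      have hqnot : q ∉ ks := (List.nodup_cons.mp hnd).1
      rw [if_neg hqnot, if_pos (by simp), hget1 q, if_pos rfl]
    · by_cases hqs : q ∈ ks
      · rw [if_pos hqs, if_pos (by simp [hqs]), hget1 q, if_neg hqk]
      · rw [if_neg hqs, if_neg (by simp [hqk, hqs]), hget1 q, if_neg hqk]

-- ---- assembly ----

theorem pv_main (fk : List (String × List String)) (hnd : (fk.map Prod.fst).Nodup) :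
    aResult fk = (bRanked fk).map (fun film => (film, (bCounts fk).getD film 0)) := by
  -- facts about A's sorted film list
  have hperm2 : (aSortedFilms fk).Perm (aFilms fk) := PySem.List.sorted_perm _ _ _
  have hnod2 : (aSortedFilms fk).Nodup := hperm2.nodup_iff.mpr (PySem.Set.nodup_ofList _)
  have hpair2 : (aSortedFilms fk).Pairwise (fun a b => aCount fk b ≤ aCount fk a) :=
    PySem.List.sorted_pairwise_rev _ _
  have hmem2 : ∀ f, f ∈ aSortedFilms fk ↔ ∃ lst ∈ (PySem.Dict.mk fk).values, f ∈ lst := by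
    intro f
    unfold aSortedFilms
    rw [PySem.List.mem_sorted]
    unfold aFilms
    rw [PySem.Set.mem_ofList, List.mem_flatMap]
  -- facts about the bucket dict
  have hkeysmid : (aMid fk).keys = PySem.Set.ofList ((aSortedFilms fk).map (aCount fk)) :=
    pv_aMid_keys fk
  have hkeysnodup : (aMid fk).keys.Nodup := by
    rw [hkeysmid]; exact PySem.Set.nodup_ofList _
  have hkeysmem : ∀ k, k ∈ (aMid fk).keys ↔ ∃ f ∈ aSortedFilms fk, aCount fk f = k := by
    intro k
    rw [hkeysmid, PySem.Set.mem_ofList, List.mem_map]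
  have hkeyspair : (aMid fk).keys.Pairwise (fun a b : Int => b < a) := by
    have h1 : ((aSortedFilms fk).map (aCount fk)).Pairwise (fun a b : Int => b ≤ a) :=
      List.pairwise_map.mpr hpair2
    have h2 : (aMid fk).keys.Pairwise (fun a b : Int => b ≤ a) := by
      rw [hkeysmid]
      exact List.Pairwise.sublist (pv_ofList_sublist Int _) h1
    have hne : (aMid fk).keys.Pairwise (fun a b : Int => a ≠ b) := hkeysnodup
    exact (h2.and hne).imp (fun h => lt_of_le_of_ne h.1 (fun he => h.2 he.symm))
  have hconts : ∀ k ∈ (aMid fk).keys, (aMid fk).contains k = true := by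
    intro k hk
    rw [pv_dict_contains_eq_keys]
    simpa using hk
  -- the re-sorted buckets
  have hkeys2 : (aMid2 fk).keys = (aMid fk).keys := pv_resort_keys _ _ hconts
  have hgetD2 : ∀ k ∈ (aMid fk).keys, (aMid2 fk).getD k [] =
      PySem.List.sorted ((aSortedFilms fk).filter (fun f => aCount fk f == k)) (fun x => x) true := by
    intro k hk
    unfold aMid2
    rw [pv_resort_getD _ _ hkeysnodup hconts k, if_pos hk, pv_aMid_getD fk k hk]
  have hbucketmem : ∀ (k : Int) (f : String),
      f ∈ PySem.List.sorted ((aSortedFilms fk).filter (fun g => aCount fk g == k)) (fun x => x) true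
        ↔ (f ∈ aSortedFilms fk ∧ aCount fk f = k) := by
    intro k f
    rw [PySem.List.mem_sorted, List.mem_filter]
    simp
  -- the flattened A-side list
  have hL0pair : ((aMid fk).keys.flatMap (fun k =>
      PySem.List.sorted ((aSortedFilms fk).filter (fun g => aCount fk g == k)) (fun x => x) true)).Pairwise
        (fun a b => toLex ((aCount fk b, b) : Int × String) < toLex ((aCount fk a, a) : Int × String)) := by
    rw [List.pairwise_flatMap]
    constructor
    · intro k _
      have hsp : (PySem.List.sorted ((aSortedFilms fk).filter (fun g => aCount fk g == k))
          (fun x => x) true).Pairwise (fun a b : String => b ≤ a) :=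
        PySem.List.sorted_pairwise_rev _ _
      have hndB : (PySem.List.sorted ((aSortedFilms fk).filter (fun g => aCount fk g == k))
          (fun x => x) true).Nodup :=
        (PySem.List.sorted_perm _ _ _).nodup_iff.mpr (hnod2.filter _)
      have hneB : (PySem.List.sorted ((aSortedFilms fk).filter (fun g => aCount fk g == k))
          (fun x => x) true).Pairwise (fun a b : String => a ≠ b) := hndB
      refine (hsp.and hneB).imp_of_mem ?_
      intro a b ha hb h
      have hca : aCount fk a = k := ((hbucketmem k a).mp ha).2
      have hcb : aCount fk b = k := ((hbucketmem k b).mp hb).2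
      rw [Prod.Lex.toLex_lt_toLex]
      right
      exact ⟨by rw [hca, hcb], lt_of_le_of_ne h.1 (fun he => h.2 he.symm)⟩
    · refine hkeyspair.imp ?_
      intro k1 k2 h x hx y hy
      have hcx : aCount fk x = k1 := ((hbucketmem k1 x).mp hx).2
      have hcy : aCount fk y = k2 := ((hbucketmem k2 y).mp hy).2
      rw [Prod.Lex.toLex_lt_toLex]
      left
      rw [hcx, hcy]
      exact h
  have hL0nodup : ((aMid fk).keys.flatMap (fun k =>
      PySem.List.sorted ((aSortedFilms fk).filter (fun g => aCount fk g == k)) (fun x => x) true)).Nodup := by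
    have : ((aMid fk).keys.flatMap (fun k =>
        PySem.List.sorted ((aSortedFilms fk).filter (fun g => aCount fk g == k)) (fun x => x) true)).Pairwise
          (fun a b : String => a ≠ b) :=
      hL0pair.imp (fun {a b} h => by rintro rfl; exact lt_irrefl _ h)
    exact this
  have hL0mem : ∀ f, f ∈ ((aMid fk).keys.flatMap (fun k =>
      PySem.List.sorted ((aSortedFilms fk).filter (fun g => aCount fk g == k)) (fun x => x) true))
        ↔ f ∈ aSortedFilms fk := by
    intro f
    rw [List.mem_flatMap]
    constructor
    · rintro ⟨k, hk, hf⟩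
      exact ((hbucketmem k f).mp hf).1
    · intro hf
      exact ⟨aCount fk f, (hkeysmem _).mpr ⟨f, hf, rfl⟩, (hbucketmem _ f).mpr ⟨hf, rfl⟩⟩
  -- B's key list is a permutation of it
  have hbkeysmem : ∀ f, f ∈ (bCounts fk).keys ↔ f ∈ aSortedFilms fk := by
    intro f
    rw [pv_bCounts_keys_mem, ← hmem2]
  have hpermB : ((aMid fk).keys.flatMap (fun k =>
      PySem.List.sorted ((aSortedFilms fk).filter (fun g => aCount fk g == k)) (fun x => x) true)).Perm
        (bCounts fk).keys :=
    (List.perm_ext_iff_of_nodup hL0nodup (pv_bCounts_keys_nodup fk)).mpr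
      (fun f => by rw [hL0mem, hbkeysmem])
  have hsorted : PySem.List.sorted (bCounts fk).keys
      (fun f => toLex ((aCount fk f, f) : Int × String)) true =
        (aMid fk).keys.flatMap (fun k =>
          PySem.List.sorted ((aSortedFilms fk).filter (fun g => aCount fk g == k)) (fun x => x) true) :=
    PySem.List.sorted_rev_eq_of_perm_of_pairwise_gt _ _ _ hpermB hL0pair
  -- assemble
  have hfinal : aResult fk = ((aMid fk).keys.flatMap (fun k =>
      PySem.List.sorted ((aSortedFilms fk).filter (fun g => aCount fk g == k)) (fun x => x) true)).map
        (fun film => (film, aCount fk film)) := by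
    unfold aResult
    rw [hkeys2, List.map_flatMap]
    exact List.flatMap_congr (fun k hk => by rw [hgetD2 k hk])
  have hKfun : (fun f => toLex (((bCounts fk).getD f 0, f) : Int × String)) =
      (fun f => toLex ((aCount fk f, f) : Int × String)) :=
    funext (fun f => by rw [pv_bCounts_getD fk f hnd])
  unfold bRanked
  rw [hKfun, hsorted, hfinal]
  apply List.map_congr_left
  intro f _
  rw [pv_bCounts_getD fk f hnd]

-- ===== VERDICT (by name: the statement is the Claim_ definition above) =====
theorem find_films_with_keywords_spec : Claim_equal_find_films_with_keywords := by
  intro fk n _hdom hpre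
  unfold Spec_find_films_with_keywords
  unfold find_films_with_keywords find_films_with_keywords_alt
  by_cases h0 : n == 0
  · simp [h0]
  · simp only [h0, Bool.false_eq_true, if_false]
    rw [pv_main fk hpre]
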